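-- pv_equiv track=rewrite | github.com/yllinjoooZ/Sistemi-i-Menaxhimit-t-Notave-p-r-Klas-n | index2.py | categorize_students
-- ===== SOURCE A (Python) =====
-- def categorize_students(students):
--     passed_students = {}
--     failed_students = {}
--     for name, grade in students.items():
--         if grade >= 60:
--             passed_students[name] = grade
--         else:
--             failed_students[name] = grade
--     return passed_students, failed_students
-- ===== SOURCE B (Python) =====
-- def categorize_students(students):
--     # Stable-sort the items so that all passing students come first (key 0)
--     # and all failing students after (key 1), each group in original order,
--     # then split the sorted list at the first failing entry.
--     items = sorted(students.items(), key=lambda kv: int(kv[1] < 60))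
--     cut = len(items)
--     for i in range(len(items)):
--         if items[i][1] < 60:
--             cut = i
--             break
--     return dict(items[:cut]), dict(items[cut:])
-- ===== Notes on version B (the rewrite author's own statement) =====
-- stated objective: alternative
-- what changed: Instead of one if/else partition loop inserting into two dicts, B stable-sorts the items by the boolean key int(grade < 60) so passers precede failers with original order preserved, scans for the first failing index, and splits the sorted list there into the two dicts.
import Mathlib
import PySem

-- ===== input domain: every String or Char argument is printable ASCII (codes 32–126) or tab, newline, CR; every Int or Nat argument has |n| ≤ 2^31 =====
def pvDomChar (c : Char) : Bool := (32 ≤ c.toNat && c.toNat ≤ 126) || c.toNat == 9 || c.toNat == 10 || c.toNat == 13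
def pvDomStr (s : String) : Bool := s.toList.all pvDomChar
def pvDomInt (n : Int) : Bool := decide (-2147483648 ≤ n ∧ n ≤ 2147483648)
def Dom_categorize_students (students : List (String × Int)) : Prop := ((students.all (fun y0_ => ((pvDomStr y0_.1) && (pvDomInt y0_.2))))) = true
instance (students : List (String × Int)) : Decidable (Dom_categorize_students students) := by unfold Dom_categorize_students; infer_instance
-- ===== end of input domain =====

-- B replaces A's single if/else partition loop by a stable sort on the boolean key
-- int(grade < 60) followed by a split at the first failing index; objective: alternative.

-- ===== PORT A =====
-- one loop over students.items(), inserting into passed_students or failed_students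
def categorize_students (students : List (String × Int)) : (List (String × Int)) × (List (String × Int)) :=
  let st := students.foldl
    (fun (acc : PySem.Dict String Int × PySem.Dict String Int) p =>
      if p.2 ≥ 60 then (acc.1.insert p.1 p.2, acc.2)
      else (acc.1, acc.2.insert p.1 p.2))
    (PySem.Dict.empty, PySem.Dict.empty)
  (st.1.items, st.2.items)

-- ===== PORT B =====
-- the for-loop with break: index of the first failing entry, defaulting to the length
def pvCut : List (String × Int) → Nat
  | [] => 0
  | p :: t => if p.2 < 60 then 0 else pvCut t + 1

-- stable sort by key int(grade < 60), then split at the first failing index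
def categorize_students_alt (students : List (String × Int)) : (List (String × Int)) × (List (String × Int)) :=
  let items := PySem.List.sorted students (fun kv => if kv.2 < 60 then (1 : Int) else 0)
  let cut := pvCut items
  -- items[:cut] / items[cut:] with 0 ≤ cut ≤ len(items): exactly take/drop
  ((PySem.Dict.ofList (items.take cut)).items, (PySem.Dict.ofList (items.drop cut)).items)

-- ===== PRECONDITION & SPEC =====
def Spec_categorize_students (students : List (String × Int)) (out : (List (String × Int)) × (List (String × Int))) : Prop := out = categorize_students_alt students
instance (students : List (String × Int)) (out : (List (String × Int)) × (List (String × Int))) : Decidable (Spec_categorize_students students out) := by unfold Spec_categorize_students; infer_instance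

-- ===== CLAIM (what is proved, stated in full; the proofs are below) =====
def Claim_equal_categorize_students : Prop := ∀ (students : List (String × Int)), Dom_categorize_students students → Spec_categorize_students students (categorize_students students)

-- ===== LEMMAS AND PROOFS =====

-- the sort key used by B
def pvKey (kv : String × Int) : Int := if kv.2 < 60 then 1 else 0

-- inserting a passing element lands at the end of the passing block
theorem insertBy_pass (x : String × Int) (hx : ¬ x.2 < 60) :
    ∀ (f0 f1 : List (String × Int)), (∀ y ∈ f0, ¬ y.2 < 60) → (∀ y ∈ f1, y.2 < 60) →
      PySem.List.insertBy (fun a b => decide (pvKey a < pvKey b)) x (f0 ++ f1)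
        = (f0 ++ [x]) ++ f1 := by
  intro f0
  induction f0 with
  | nil =>
      intro f1 _ h1
      cases f1 with
      | nil => rfl
      | cons y ys =>
          have hy := h1 y (List.mem_cons_self)
          have hb : decide (pvKey x < pvKey y) = true := by simp [pvKey, hx, hy]
          simp [PySem.List.insertBy, hb]
  | cons z f0 ih =>
      intro f1 h0 h1
      have hz := h0 z (List.mem_cons_self)
      have hb : decide (pvKey x < pvKey z) = false := by simp [pvKey, hx, hz]
      have ht := ih f1 (fun y hy => h0 y (List.mem_cons_of_mem z hy)) h1
      simp [PySem.List.insertBy, hb, ht]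

-- inserting a failing element lands at the very end
theorem insertBy_fail (x : String × Int) (hx : x.2 < 60) (l : List (String × Int)) :
    PySem.List.insertBy (fun a b => decide (pvKey a < pvKey b)) x l = l ++ [x] := by
  apply PySem.List.insertBy_of_forall_not_before
  intro y _
  simp only [pvKey, hx, if_pos]
  by_cases hy : y.2 < 60 <;> simp [hy]

-- the insertion-sort fold keeps the passing block before the failing block
theorem foldl_insertBy_split (l : List (String × Int)) :
    ∀ (f0 f1 : List (String × Int)), (∀ y ∈ f0, ¬ y.2 < 60) → (∀ y ∈ f1, y.2 < 60) →
      l.foldl (fun acc x => PySem.List.insertBy (fun a b => decide (pvKey a < pvKey b)) x acc) (f0 ++ f1)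
        = (f0 ++ l.filter (fun p => !decide (p.2 < 60))) ++ (f1 ++ l.filter (fun p => decide (p.2 < 60))) := by
  induction l with
  | nil => intro f0 f1 _ _; simp
  | cons x t ih =>
      intro f0 f1 h0 h1
      by_cases hx : x.2 < 60
      · have hins : PySem.List.insertBy (fun a b => decide (pvKey a < pvKey b)) x (f0 ++ f1)
            = f0 ++ (f1 ++ [x]) := by
          simpa using insertBy_fail x hx (f0 ++ f1)
        have ht := ih f0 (f1 ++ [x]) h0 (by
          intro y hy
          rcases List.mem_append.mp hy with h | h
          · exact h1 y h
          · simp at h; simpa [h] using hx)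
        rw [List.foldl_cons]
        simp only [hins] at *
        rw [ht]
        simp [hx]
      · have hins := insertBy_pass x hx f0 f1 h0 h1
        have ht := ih (f0 ++ [x]) f1 (by
          intro y hy
          rcases List.mem_append.mp hy with h | h
          · exact h0 y h
          · simp at h; simpa [h] using hx) h1
        rw [List.foldl_cons, hins, ht]
        simp [hx]

-- B's sorted list is the passing block followed by the failing block
theorem sorted_split (students : List (String × Int)) :
    PySem.List.sorted students (fun kv => if kv.2 < 60 then (1 : Int) else 0)
      = students.filter (fun p => !decide (p.2 < 60)) ++ students.filter (fun p => decide (p.2 < 60)) := by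
  have h := PySem.List.sorted_eq_foldl_insertBy students pvKey
  have h2 := foldl_insertBy_split students [] [] (by simp) (by simp)
  simp only [List.nil_append] at h2
  calc PySem.List.sorted students (fun kv => if kv.2 < 60 then (1 : Int) else 0)
      = PySem.List.sorted students pvKey := rfl
    _ = _ := by rw [h, h2]

-- the break scan finds exactly the length of the passing block
theorem pvCut_split (f0 f1 : List (String × Int)) (h0 : ∀ y ∈ f0, ¬ y.2 < 60)
    (h1 : ∀ y ∈ f1, y.2 < 60) : pvCut (f0 ++ f1) = f0.length := by
  induction f0 with
  | nil =>
      cases f1 with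
      | nil => rfl
      | cons y ys => simp [pvCut, h1 y List.mem_cons_self]
  | cons z f0 ih =>
      have hz := h0 z List.mem_cons_self
      simp [pvCut, hz, ih (fun y hy => h0 y (List.mem_cons_of_mem z hy))]

-- A's single pass from accumulators (d1, d2) equals the two filtering folds
theorem categorize_foldl_split (l : List (String × Int)) :
    ∀ (d1 d2 : PySem.Dict String Int),
      l.foldl
        (fun (acc : PySem.Dict String Int × PySem.Dict String Int) p =>
          if p.2 ≥ 60 then (acc.1.insert p.1 p.2, acc.2)
          else (acc.1, acc.2.insert p.1 p.2)) (d1, d2)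
      = ((l.filter (fun p => !decide (p.2 < 60))).foldl (fun d p => d.insert p.1 p.2) d1,
         (l.filter (fun p => decide (p.2 < 60))).foldl (fun d p => d.insert p.1 p.2) d2) := by
  induction l with
  | nil => intro d1 d2; rfl
  | cons p l ih =>
      intro d1 d2
      by_cases h : p.2 < 60
      · simp [List.foldl_cons, not_le.mpr h, h, ih]
      · simp [List.foldl_cons, not_lt.mp h, h, ih]

-- ===== VERDICT (by name: the statement is the Claim_ definition above) =====
theorem categorize_students_spec : Claim_equal_categorize_students := by
  intro students _
  show _ = _
  have h0 : ∀ y ∈ students.filter (fun p => !decide (p.2 < 60)), ¬ y.2 < 60 := by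
    intro y hy; simpa using (List.mem_filter.mp hy).2
  have h1 : ∀ y ∈ students.filter (fun p => decide (p.2 < 60)), y.2 < 60 := by
    intro y hy; simpa using (List.mem_filter.mp hy).2
  have hcut := pvCut_split _ _ h0 h1
  simp only [categorize_students, categorize_students_alt, sorted_split, hcut,
    List.take_left, List.drop_left,
    categorize_foldl_split students PySem.Dict.empty PySem.Dict.empty]
  rfl
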